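-- pv_equiv track=rewrite | github.com/siddharth143/hive-builder | src/digest.py | _normalize_theme
-- ===== SOURCE A (Python) =====
-- THEME_SECTION_ORDER: tuple[str, ...] = (
--     "AI infrastructure & compute",
--     "System design & engineering",
--     "AI product strategy & agents",
--     "Business & market signals",
--     "Productivity & workflows",
--     "Vibe coding",
--     "AI Product Management",
--     "AI Models",
-- )
--
-- _DEFAULT_THEME = "AI Product Management"
--
-- def _normalize_theme(raw: str) -> str:
--     """Map model output to a canonical theme from THEME_SECTION_ORDER."""
--     s = (raw or "").strip()
--     if not s:
--         return _DEFAULT_THEME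
--     sl = s.lower()
--     for canonical in THEME_SECTION_ORDER:
--         if sl == canonical.lower():
--             return canonical
--     for canonical in THEME_SECTION_ORDER:
--         if sl in canonical.lower() or canonical.lower() in sl:
--             return canonical
--     return _DEFAULT_THEME
-- ===== SOURCE B (Python) =====
-- THEME_SECTION_ORDER: tuple[str, ...] = (
--     "AI infrastructure & compute",
--     "System design & engineering",
--     "AI product strategy & agents",
--     "Business & market signals",
--     "Productivity & workflows",
--     "Vibe coding",
--     "AI Product Management",
--     "AI Models",
-- )
--
-- _DEFAULT_THEME = "AI Product Management"
--
-- def _normalize_theme(raw: str) -> str: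
--     """Single pass: return an exact match at once, remember the first substring hit."""
--     s = (raw or "").strip()
--     if not s:
--         return _DEFAULT_THEME
--     sl = s.lower()
--     fallback = None
--     for canonical in THEME_SECTION_ORDER:
--         cl = canonical.lower()
--         if sl == cl:
--             return canonical
--         if fallback is None and (sl in cl or cl in sl):
--             fallback = canonical
--     return fallback if fallback is not None else _DEFAULT_THEME
-- ===== Notes on version B (the rewrite author's own statement) =====
-- stated objective: alternative
-- what changed: The two sequential loops over THEME_SECTION_ORDER (exact-match pass, then substring pass) are merged into one pass that returns an exact match immediately and records the first substring hit in a fallback variable returned after the loop.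
import Mathlib
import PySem

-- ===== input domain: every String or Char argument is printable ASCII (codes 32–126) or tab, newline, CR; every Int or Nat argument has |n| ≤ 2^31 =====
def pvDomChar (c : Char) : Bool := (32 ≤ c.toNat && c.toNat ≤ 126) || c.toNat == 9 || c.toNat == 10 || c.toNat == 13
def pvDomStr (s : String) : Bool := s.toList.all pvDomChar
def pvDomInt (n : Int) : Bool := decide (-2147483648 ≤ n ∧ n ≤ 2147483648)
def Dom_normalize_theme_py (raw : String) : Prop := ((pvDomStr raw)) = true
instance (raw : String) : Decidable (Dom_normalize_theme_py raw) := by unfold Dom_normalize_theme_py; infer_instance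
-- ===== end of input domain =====

-- B merges A's two loops into a single pass with a fallback variable (objective: alternative decomposition).

-- shared module constants (Python: THEME_SECTION_ORDER, _DEFAULT_THEME)
def themeSectionOrder : List String :=
  [ "AI infrastructure & compute",
    "System design & engineering",
    "AI product strategy & agents",
    "Business & market signals",
    "Productivity & workflows",
    "Vibe coding",
    "AI Product Management",
    "AI Models" ]

def defaultTheme : String := "AI Product Management"

-- ===== PORT A =====
-- two passes: first-exact-match loop, then first-substring-match loop ('for … return' = List.find?)
def normalize_theme_py (raw : String) : String :=
  let s := PySem.Str.strip (if raw = "" then "" else raw)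
  if s = "" then defaultTheme
  else
    let sl := PySem.Str.lower s
    match themeSectionOrder.find? (fun c => sl == PySem.Str.lower c) with
    | some c => c
    | none =>
      match themeSectionOrder.find?
          (fun c => PySem.Str.isIn sl (PySem.Str.lower c) || PySem.Str.isIn (PySem.Str.lower c) sl) with
      | some c => c
      | none => defaultTheme

-- ===== PORT B =====
-- single loop carrying the fallback variable (None = Option.none)
def normalizeAltGo (sl : String) : List String → Option String → String
  | [], fallback => fallback.getD defaultTheme
  | c :: rest, fallback =>
    let cl := PySem.Str.lower c
    if sl == cl then c
    else if fallback.isNone && (PySem.Str.isIn sl cl || PySem.Str.isIn cl sl) then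
      normalizeAltGo sl rest (some c)
    else
      normalizeAltGo sl rest fallback

def normalize_theme_py_alt (raw : String) : String :=
  let s := PySem.Str.strip (if raw = "" then "" else raw)
  if s = "" then defaultTheme
  else normalizeAltGo (PySem.Str.lower s) themeSectionOrder none

-- ===== PRECONDITION & SPEC =====
def Spec_normalize_theme_py (raw : String) (out : String) : Prop := out = normalize_theme_py_alt raw
instance (raw : String) (out : String) : Decidable (Spec_normalize_theme_py raw out) := by unfold Spec_normalize_theme_py; infer_instance

-- ===== CLAIM (what is proved, stated in full; the proofs are below) =====
def Claim_equal_normalize_theme_py : Prop := ∀ (raw : String), Dom_normalize_theme_py raw → Spec_normalize_theme_py raw (normalize_theme_py raw)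

-- ===== LEMMAS AND PROOFS =====

-- with a fallback already recorded, the single pass only looks for an exact match
theorem normalizeAltGo_some (sl : String) (l : List String) (f : String) :
    normalizeAltGo sl l (some f) =
      match l.find? (fun c => sl == PySem.Str.lower c) with
      | some c => c
      | none => f := by
  induction l with
  | nil => simp [normalizeAltGo]
  | cons c rest ih =>
    by_cases h : (sl == PySem.Str.lower c) = true
    · simp [normalizeAltGo, List.find?, h]
    · simp only [normalizeAltGo, List.find?, h, Bool.false_eq_true, if_false,
        Option.isNone_some, Bool.false_and, ih]

-- the single pass with no fallback yet computes A's two-pass result on the same list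
theorem normalizeAltGo_none (sl : String) (l : List String) :
    normalizeAltGo sl l none =
      match l.find? (fun c => sl == PySem.Str.lower c) with
      | some c => c
      | none =>
        match l.find?
            (fun c => PySem.Str.isIn sl (PySem.Str.lower c) || PySem.Str.isIn (PySem.Str.lower c) sl) with
        | some c => c
        | none => defaultTheme := by
  induction l with
  | nil => simp [normalizeAltGo]
  | cons c rest ih =>
    by_cases h : (sl == PySem.Str.lower c) = true
    · simp [normalizeAltGo, List.find?, h]
    · by_cases h2 : (PySem.Str.isIn sl (PySem.Str.lower c) || PySem.Str.isIn (PySem.Str.lower c) sl) = true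
      · simp only [normalizeAltGo, List.find?, h, Bool.false_eq_true, if_false,
          Option.isNone_none, Bool.true_and, h2, if_true, normalizeAltGo_some]
      · simp only [normalizeAltGo, List.find?, h, Bool.false_eq_true, if_false,
          Option.isNone_none, Bool.true_and, h2, ih]

-- ===== VERDICT (by name: the statement is the Claim_ definition above) =====
theorem normalize_theme_py_spec : Claim_equal_normalize_theme_py := by
  intro raw _
  unfold Spec_normalize_theme_py normalize_theme_py normalize_theme_py_alt
  simp only [normalizeAltGo_none]
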